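-- pv_equiv track=rewrite | github.com/dudtj5307/Coding_skills | 프로그래머스/unrated/181921. 배열 만들기 2/배열 만들기 2.py | solution
-- ===== SOURCE A (Python) =====
-- def solution(l, r):
--     prev = [5]
--     answer = [5]
--     for i in range(0, len(str(r))-1):
--         temp = []
--         for p in prev:
--             temp.extend([p*10, p*10 + 5])
--         answer.extend(temp)
--         prev = temp
--     answer = list(filter(lambda x: l<=x<=r, answer))
--     if not answer: return [-1]
--     return answer
-- ===== SOURCE B (Python) =====
-- def solution(l, r):
--     # Enumerate the n-th all-{0,5}-digit number directly (binary expansion of n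
--     # with digit value 5), in increasing order, stopping once it exceeds r.
--     ans = []
--     n = 1
--     while True:
--         v, m, p = 0, n, 1
--         while m:
--             if m & 1:
--                 v += 5 * p
--             m >>= 1
--             p *= 10
--         if v > r:
--             break
--         if v >= l:
--             ans.append(v)
--         n += 1
--     if not ans:
--         return [-1]
--     return ans
-- ===== Notes on version B (the rewrite author's own statement) =====
-- stated objective: alternative
-- what changed: Replaces A's BFS-style level-by-level doubling of a candidate list (sized by len(str(r))) followed by a range filter with a direct enumeration: the n-th all-{0,5}-digit number is obtained from the binary expansion of n (bit -> digit 5), generated in increasing order until it exceeds r.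
import Mathlib
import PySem

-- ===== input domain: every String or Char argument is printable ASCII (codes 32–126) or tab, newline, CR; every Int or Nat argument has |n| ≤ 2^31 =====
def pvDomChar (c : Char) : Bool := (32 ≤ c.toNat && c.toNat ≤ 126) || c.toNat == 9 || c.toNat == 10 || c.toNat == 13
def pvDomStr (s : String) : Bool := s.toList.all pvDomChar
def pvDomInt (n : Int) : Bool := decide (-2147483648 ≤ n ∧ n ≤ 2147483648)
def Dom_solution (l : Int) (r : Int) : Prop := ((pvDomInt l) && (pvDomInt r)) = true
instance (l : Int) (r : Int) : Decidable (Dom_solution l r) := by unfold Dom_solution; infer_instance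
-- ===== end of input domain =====

-- B replaces A's level-by-level doubling of a candidate list with a direct in-order
-- enumeration of the all-{0,5}-digit numbers from the binary expansion of a counter
-- (objective: alternative algorithm; both are total, equal on all inputs).

-- ===== PORT A =====
def solution (l : Int) (r : Int) : List Int :=
  let st := (PySem.List.pyRange 0 (PySem.Str.len (PySem.Int.toStr r) - 1) 1).foldl
      (fun (st : List Int × List Int) _ =>
        let temp := st.1.foldl (fun t p => t ++ [p * 10, p * 10 + 5]) []
        (temp, st.2 ++ temp)) ([5], [5])
  let answer := st.2.filter (fun x => decide (l ≤ x) && decide (x ≤ r))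
  if answer = [] then [-1] else answer

-- ===== PORT B =====
-- inner `while m:` loop of Source B (v, m, p are the Python loop state; all stay ≥ 0)
def pvVal (v m p : Nat) : Nat :=
  if m = 0 then v
  else pvVal (if m % 2 = 1 then v + 5 * p else v) (m / 2) (p * 10)
termination_by m
decreasing_by exact Nat.div_lt_self (Nat.pos_of_ne_zero (by assumption)) (by norm_num)

-- n ≤ pvVal 0 n 1 (needed to terminate the outer loop; proved below the port it serves)
theorem pv_le_pvVal (n : Nat) : n ≤ pvVal 0 n 1 := by
  suffices h : ∀ m v p, 0 < p → m * p + v ≤ pvVal v m p by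
    have := h n 0 1 one_pos; omega
  intro m
  induction m using Nat.strong_induction_on with
  | _ m ih =>
    intro v p hp
    rw [pvVal]
    by_cases hm : m = 0
    · simp [hm]
    · simp only [hm, reduceIte]
      have h2 : m / 2 < m := Nat.div_lt_self (Nat.pos_of_ne_zero hm) (by norm_num)
      have := ih (m / 2) h2 (if m % 2 = 1 then v + 5 * p else v) (p * 10) (by positivity)
      have hmd : m = 2 * (m / 2) + m % 2 := (Nat.div_add_mod m 2).symm.trans (by ring)
      by_cases ho : m % 2 = 1
      · simp only [ho, reduceIte] at this ⊢
        nlinarith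
      · have h0 : m % 2 = 0 := by omega
        simp only [ho, reduceIte] at this ⊢
        nlinarith

-- outer `while True:` loop of Source B
def pvLoopB (l r : Int) (n : Nat) (ans : List Int) : List Int :=
  let v : Int := (pvVal 0 n 1 : Nat)
  if v > r then ans
  else pvLoopB l r (n + 1) (if v ≥ l then ans ++ [v] else ans)
termination_by r.toNat + 1 - n
decreasing_by
  have h1 : (n : Int) ≤ ((pvVal 0 n 1 : Nat) : Int) := by exact_mod_cast pv_le_pvVal n
  omega

def solution_alt (l : Int) (r : Int) : List Int :=
  let ans := pvLoopB l r 1 []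
  if ans = [] then [-1] else ans

-- ===== PRECONDITION & SPEC =====
def Spec_solution (l : Int) (r : Int) (out : List Int) : Prop := out = solution_alt l r
instance (l : Int) (r : Int) (out : List Int) : Decidable (Spec_solution l r out) := by unfold Spec_solution; infer_instance

-- ===== CLAIM (what is proved, stated in full; the proofs are below) =====
def Claim_equal_solution : Prop := ∀ (l : Int) (r : Int), Dom_solution l r → Spec_solution l r (solution l r)

-- ===== LEMMAS AND PROOFS =====

-- the n-th candidate, as a Nat (gN n = 5 * (binary expansion of n read in base 10))
def gN (n : Nat) : Nat := pvVal 0 n 1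

def gI (n : Nat) : Int := (gN n : Nat)

theorem pvVal_acc (m : Nat) : ∀ v p, pvVal v m p = v + pvVal 0 m p := by
  induction m using Nat.strong_induction_on with
  | _ m ih =>
    intro v p
    by_cases hm : m = 0
    · conv_lhs => rw [pvVal]
      conv_rhs => rw [pvVal]
      simp [hm]
    · have h2 : m / 2 < m := Nat.div_lt_self (Nat.pos_of_ne_zero hm) (by norm_num)
      conv_lhs => rw [pvVal]
      conv_rhs => rw [pvVal]
      simp only [hm, reduceIte]
      rw [ih _ h2, ih _ h2 (if m % 2 = 1 then 0 + 5 * p else 0)]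
      split_ifs <;> omega

theorem pvVal_mul (m : Nat) : ∀ p, pvVal 0 m p = p * pvVal 0 m 1 := by
  induction m using Nat.strong_induction_on with
  | _ m ih =>
    intro p
    by_cases hm : m = 0
    · conv_lhs => rw [pvVal]
      conv_rhs => rw [pvVal]
      simp [hm]
    · have h2 : m / 2 < m := Nat.div_lt_self (Nat.pos_of_ne_zero hm) (by norm_num)
      conv_lhs => rw [pvVal]
      conv_rhs => rw [pvVal]
      simp only [hm, reduceIte]
      rw [pvVal_acc, pvVal_acc (m / 2) (if m % 2 = 1 then 0 + 5 * 1 else 0), ih _ h2 (p * 10), ih _ h2 (1 * 10)]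
      split_ifs <;> ring

theorem gN_rec (n : Nat) (hn : n ≠ 0) : gN n = 10 * gN (n / 2) + 5 * (n % 2) := by
  unfold gN
  conv_lhs => rw [pvVal]
  simp only [hn, reduceIte]
  rw [pvVal_acc, pvVal_mul _ (1 * 10)]
  have h2 : n % 2 < 2 := Nat.mod_lt n (by norm_num)
  split_ifs <;> omega

theorem gN_zero : gN 0 = 0 := by unfold gN; rw [pvVal]; norm_num

theorem gN_one : gN 1 = 5 := by
  unfold gN
  rw [pvVal]
  norm_num
  rw [pvVal]
  norm_num

theorem gN_succ_lt (n : Nat) : gN n < gN (n + 1) := by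
  induction n using Nat.strong_induction_on with
  | _ n ih =>
    by_cases hn : n = 0
    · subst hn
      rw [gN_zero]
      rw [show (0 + 1) = 1 from rfl, gN_one]
      norm_num
    · rw [gN_rec n hn, gN_rec (n + 1) (by omega)]
      rcases Nat.even_or_odd n with ⟨m, hm⟩ | ⟨m, hm⟩
      · have h1 : n / 2 = m := by omega
        have h2 : (n + 1) / 2 = m := by omega
        have h3 : n % 2 = 0 := by omega
        have h4 : (n + 1) % 2 = 1 := by omega
        rw [h1, h2, h3, h4]; omega
      · have h1 : n / 2 = m := by omega
        have h2 : (n + 1) / 2 = m + 1 := by omega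
        have h3 : n % 2 = 1 := by omega
        have h4 : (n + 1) % 2 = 0 := by omega
        have h5 : gN m < gN (m + 1) := ih m (by omega)
        rw [h1, h2, h3, h4]; omega

theorem gN_mono : StrictMono gN := strictMono_nat_of_lt_succ gN_succ_lt

theorem gN_ge_five {n : Nat} (hn : 1 ≤ n) : 5 ≤ gN n := by
  rcases Nat.eq_or_lt_of_le hn with h | h
  · rw [← h, gN_one]
  · have := gN_mono h; rw [gN_one] at this; omega

theorem gN_pow (k : Nat) : ∀ n, 2 ^ k ≤ n → 5 * 10 ^ k ≤ gN n := by
  induction k with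
  | zero => intro n hn; simpa using gN_ge_five (by simpa using hn)
  | succ k ih =>
    intro n hn
    have hn0 : n ≠ 0 := by have := pow_pos (show 0 < 2 by norm_num) (k + 1); omega
    have hd : 2 ^ k ≤ n / 2 := by
      have := Nat.pow_succ 2 k
      omega
    have := ih (n / 2) hd
    rw [gN_rec n hn0]
    have : 5 * 10 ^ (k + 1) = 10 * (5 * 10 ^ k) := by ring
    omega

-- first counter value whose candidate exceeds r
theorem pvN_ex (r : Int) : ∃ n : Nat, r < gI n := by
  refine ⟨r.toNat + 1, ?_⟩
  have := pv_le_pvVal (r.toNat + 1)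
  unfold gI gN
  omega

def pvN (r : Int) : Nat := Nat.find (pvN_ex r)

theorem pvN_spec (r : Int) : r < gI (pvN r) := Nat.find_spec (pvN_ex r)

theorem pvN_le {r : Int} {n : Nat} (h : r < gI n) : pvN r ≤ n := Nat.find_min' (pvN_ex r) h

theorem lt_pvN {r : Int} {n : Nat} (h : gI n ≤ r) : n < pvN r := by
  by_contra hc
  push Not at hc
  have := pvN_spec r
  rcases Nat.eq_or_lt_of_le hc with he | hl
  · rw [he] at this; omega
  · have := gN_mono hl
    unfold gI at *
    omega

theorem le_of_lt_pvN {r : Int} {n : Nat} (h : n < pvN r) : gI n ≤ r := by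
  by_contra hc
  push Not at hc
  exact absurd (pvN_le hc) (by omega)

-- B's loop computes the candidates with index in [n, pvN r), filtered by l ≤ ·
theorem gI_mono {n m : Nat} (h : n ≤ m) : gI n ≤ gI m := by
  unfold gI; exact_mod_cast gN_mono.monotone h

theorem pvLoopB_eq (l r : Int) (n : Nat) (ans : List Int) :
    pvLoopB l r n ans =
      ans ++ ((List.range' n (pvN r - n)).map gI).filter (fun v => decide (l ≤ v)) := by
  induction n, ans using pvLoopB.induct l r with
  | case1 n ans v hgt =>
    have hgt' : ((pvVal 0 n 1 : Nat) : Int) > r := hgt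
    rw [pvLoopB]
    rw [if_pos hgt']
    have hle : pvN r ≤ n := pvN_le (by exact_mod_cast hgt')
    rw [show pvN r - n = 0 by omega]
    simp
  | case2 n ans v hle ih =>
    have hle' : ¬ ((pvVal 0 n 1 : Nat) : Int) > r := hle
    have hvr : gI n ≤ r := by unfold gI gN; omega
    have hlt : n < pvN r := lt_pvN hvr
    rw [pvLoopB]
    rw [if_neg hle']
    have hgi : v = gI n := rfl
    refine Eq.trans ih ?_
    rw [show pvN r - n = (pvN r - (n + 1)) + 1 by omega, List.range'_succ]
    simp only [List.map_cons, List.filter_cons]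
    by_cases hl : l ≤ gI n
    · rw [dif_pos (show v ≥ l from hgi ▸ hl), hgi]
      simp [hl]
    · rw [dif_neg (show ¬ v ≥ l from hgi ▸ hl)]
      simp [hl]

-- ===== A-side =====
def stepA (st : List Int × List Int) : List Int × List Int :=
  let temp := st.1.foldl (fun t p => t ++ [p * 10, p * 10 + 5]) []
  (temp, st.2 ++ temp)

theorem foldl_const {α β : Type} (F : α → α) (init : α) (xs : List β) :
    List.foldl (fun st _ => F st) init xs = F^[xs.length] init := by
  induction xs generalizing init with
  | nil => rfl
  | cons x xs ih => simp [List.foldl, ih, Function.iterate_succ_apply]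

theorem gN_even (a : Nat) : gN (2 * a) = 10 * gN a := by
  by_cases ha : a = 0
  · subst ha; rw [show 2 * 0 = 0 by ring, gN_zero]
  · rw [gN_rec (2 * a) (by omega), show 2 * a / 2 = a by omega, show 2 * a % 2 = 0 by omega]
    omega

theorem gN_odd (a : Nat) : gN (2 * a + 1) = 10 * gN a + 5 := by
  rw [gN_rec (2 * a + 1) (by omega), show (2 * a + 1) / 2 = a by omega,
    show (2 * a + 1) % 2 = 1 by omega]

theorem step_level (k : Nat) : ∀ a, ((List.range' a k).map gI).flatMap (fun p => [p * 10, p * 10 + 5]) =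
    (List.range' (2 * a) (2 * k)).map gI := by
  induction k with
  | zero => intro a; simp
  | succ k ih =>
    intro a
    rw [List.range'_succ]
    have h2 : 2 * (k + 1) = (2 * k) + 1 + 1 := by ring
    rw [h2, List.range'_succ, List.range'_succ]
    simp only [List.map_cons, List.flatMap_cons, List.cons_append, List.nil_append]
    rw [ih (a + 1)]
    have he : gI a * 10 = gI (2 * a) := by
      unfold gI; rw [gN_even]; push_cast; ring
    have ho : gI a * 10 + 5 = gI (2 * a + 1) := by
      unfold gI; rw [gN_odd]; push_cast; ring
    rw [ho, he, show 2 * (a + 1) = 2 * a + 1 + 1 by ring]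

theorem iterA (k : Nat) :
    stepA^[k] ([5], [5]) =
      ((List.range' (2 ^ k) (2 ^ k)).map gI, (List.range' 1 (2 ^ (k + 1) - 1)).map gI) := by
  induction k with
  | zero =>
    simp only [Function.iterate_zero, id_eq, pow_zero]
    rw [show (2 : Nat) ^ (0 + 1) - 1 = 1 by norm_num]
    simp [List.range'_one, gI, gN_one]
  | succ k ih =>
    rw [Function.iterate_succ_apply', ih]
    unfold stepA
    simp only
    rw [PySem.List.foldl_append_eq_flatMap (fun p => [p * 10, p * 10 + 5]), List.nil_append,
      step_level (2 ^ k) (2 ^ k)]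
    rw [Prod.mk.injEq]
    constructor
    · rw [show 2 * 2 ^ k = 2 ^ (k + 1) by rw [pow_succ]; ring]
    · rw [← List.map_append]
      congr 1
      have := List.range'_append (s := 1) (m := 2 ^ (k + 1) - 1) (n := 2 ^ (k + 1)) (step := 1)
      have h1 : (0:Nat) < 2 ^ (k + 1) := pow_pos (by norm_num) _
      have hp : (2:Nat) ^ (k + 1 + 1) = 2 ^ (k + 1) + 2 ^ (k + 1) := by rw [pow_succ]; ring
      rw [show 1 + 1 * (2 ^ (k + 1) - 1) = 2 ^ (k + 1) by omega,
        show 2 ^ (k + 1) - 1 + 2 ^ (k + 1) = 2 ^ (k + 1 + 1) - 1 by omega] at this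
      rw [show (2:Nat) * 2 ^ k = 2 ^ (k + 1) by rw [pow_succ]; ring]
      exact this

-- str(r) has at least one character
theorem toDigitsCore_len_pos (f n : Nat) : 1 ≤ (Nat.toDigitsCore 10 (f + 1) n []).length := by
  rw [Nat.toDigitsCore]
  split
  · simp
  · rw [Nat.toDigitsCore_lens_eq]; omega

theorem toChars_len_pos (r : Int) : 1 ≤ (PySem.Int.toChars r).length := by
  unfold PySem.Int.toChars
  split
  · simp
  · exact toDigitsCore_len_pos _ _

-- r < 10 ^ len(str(r)) for r ≥ 0
theorem toDigitsCore_lb (f : Nat) : ∀ n, n < f → n < 10 ^ (Nat.toDigitsCore 10 f n []).length := by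
  induction f with
  | zero => omega
  | succ f ih =>
    intro n hn
    rw [Nat.toDigitsCore]
    split
    · next h => simp; omega
    · next h =>
      rw [Nat.toDigitsCore_lens_eq]
      have hd : n / 10 < f := by omega
      have := ih (n / 10) hd
      have : n < 10 * 10 ^ (Nat.toDigitsCore 10 f (n / 10) []).length := by omega
      calc n < 10 * 10 ^ (Nat.toDigitsCore 10 f (n / 10) []).length := this
        _ = 10 ^ ((Nat.toDigitsCore 10 f (n / 10) []).length + 1) := by ring

theorem toChars_lb (r : Int) (hr : 0 ≤ r) : r < 10 ^ (PySem.Int.toChars r).length := by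
  unfold PySem.Int.toChars
  rw [if_neg (by omega)]
  have h := toDigitsCore_lb (r.toNat + 1) r.toNat (by omega)
  rw [Nat.toDigits]
  calc r = (r.toNat : Int) := (Int.toNat_of_nonneg hr).symm
    _ < ((10 ^ (Nat.toDigitsCore 10 (r.toNat + 1) r.toNat []).length : Nat) : Int) := by
        exact_mod_cast h
    _ = (10 : Int) ^ (Nat.toDigitsCore 10 (r.toNat + 1) r.toNat []).length := by push_cast; ring

theorem gI_one : gI 1 = 5 := by unfold gI; rw [gN_one]; norm_num

-- the filtered candidate lists of the two programs coincide
theorem lists_eq (l r : Int) :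
    ((List.range' 1 (2 ^ (PySem.Int.toChars r).length - 1)).map gI).filter
        (fun x => decide (l ≤ x) && decide (x ≤ r))
      = ((List.range' 1 (pvN r - 1)).map gI).filter (fun v => decide (l ≤ v)) := by
  by_cases hr : r < 5
  · have hA : ((List.range' 1 (2 ^ (PySem.Int.toChars r).length - 1)).map gI).filter
        (fun x => decide (l ≤ x) && decide (x ≤ r)) = [] := by
      apply List.filter_eq_nil_iff.mpr
      intro x hx
      rw [List.mem_map] at hx
      obtain ⟨n, hn, hgx⟩ := hx
      rw [List.mem_range'_1] at hn
      have h5 : 5 ≤ gN n := gN_ge_five hn.1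
      have hxr : ¬ x ≤ r := by
        subst hgx; unfold gI; omega
      simp [hxr]
    have hB : pvN r ≤ 1 := pvN_le (by rw [gI_one]; omega)
    rw [hA, show pvN r - 1 = 0 by omega]
    simp
  · set d := (PySem.Int.toChars r).length with hd
    have hd1 : 1 ≤ d := toChars_len_pos r
    have hrpos : (0:Int) ≤ r := by omega
    have hNle : pvN r ≤ 2 ^ d := by
      apply pvN_le
      have hp : 5 * 10 ^ d ≤ gN (2 ^ d) := gN_pow d (2 ^ d) (le_refl _)
      have h5 : (10:Nat) ^ d ≤ 5 * 10 ^ d := Nat.le_mul_of_pos_left _ (by norm_num)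
      have hr10 : r < ((10 ^ d : Nat) : Int) := by
        have := toChars_lb r hrpos
        push_cast
        exact this
      have hc : ((10 ^ d : Nat) : Int) ≤ (gN (2 ^ d) : Int) := by
        exact_mod_cast le_trans h5 hp
      unfold gI
      omega
    have hN1 : 1 < pvN r := lt_pvN (by rw [gI_one]; omega)
    have hsplit : List.range' 1 (2 ^ d - 1) =
        List.range' 1 (pvN r - 1) ++ List.range' (pvN r) (2 ^ d - pvN r) := by
      have h := List.range'_append (s := 1) (m := pvN r - 1) (n := 2 ^ d - pvN r) (step := 1)
      rw [show 1 + 1 * (pvN r - 1) = pvN r by omega,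
        show pvN r - 1 + (2 ^ d - pvN r) = 2 ^ d - 1 by omega] at h
      exact h.symm
    rw [List.filter_map, List.filter_map, hsplit, List.filter_append]
    have h2nil : (List.range' (pvN r) (2 ^ d - pvN r)).filter
        ((fun x => decide (l ≤ x) && decide (x ≤ r)) ∘ gI) = [] := by
      apply List.filter_eq_nil_iff.mpr
      intro n hn
      rw [List.mem_range'_1] at hn
      have hgt : r < gI n := lt_of_lt_of_le (pvN_spec r) (gI_mono hn.1)
      simp only [Function.comp_apply, Bool.and_eq_true, decide_eq_true_eq, not_and]
      intro _
      omega
    rw [h2nil, List.append_nil]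
    congr 1
    apply List.filter_congr
    intro n hn
    rw [List.mem_range'_1] at hn
    have hnr : gI n ≤ r := le_of_lt_pvN (by omega)
    simp only [Function.comp_apply]
    rw [decide_eq_true hnr, Bool.and_true]

-- ===== VERDICT (by name: the statement is the Claim_ definition above) =====
theorem solution_spec : Claim_equal_solution := by
  intro l r _
  unfold Spec_solution solution solution_alt
  rw [pvLoopB_eq]
  simp only [List.nil_append]
  have hd1 : 1 ≤ (PySem.Int.toChars r).length := toChars_len_pos r
  have hlen : PySem.Str.len (PySem.Int.toStr r) - 1 =
      (((PySem.Int.toChars r).length - 1 : Nat) : Int) := by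
    simp only [PySem.Str.len, PySem.Int.toList_toStr]
    push_cast [Nat.cast_sub hd1]
    ring
  rw [hlen, PySem.List.pyRange_zero_natCast]
  rw [show (fun (st : List Int × List Int) (_ : Int) =>
        let temp := st.1.foldl (fun t p => t ++ [p * 10, p * 10 + 5]) []
        (temp, st.2 ++ temp)) = (fun st _ => stepA st) from rfl]
  rw [foldl_const]
  simp only [List.length_map, List.length_range]
  rw [iterA]
  simp only
  rw [show (PySem.Int.toChars r).length - 1 + 1 = (PySem.Int.toChars r).length by omega]
  rw [lists_eq l r]
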